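-- pv_equiv track=rewrite | github.com/pypi-data/pypi-mirror-380 | packages/pyedi/pyedi-1.1.0.tar.gz/pyedi-1.1.0/pyedi/core/structured_formatter.py | _partition_segments
-- ===== SOURCE A (Python) =====
-- from typing import Dict, Any, List, Optional, Union
--
-- def _partition_segments(segments: List[Dict[str, Any]]) -> tuple:
--     """
--     Partition segments into heading and detail sections.
--     Heading typically includes setup segments like ST, BGN/BHT, N1 loops, etc.
--     Detail includes the main content like claims, members, service lines, etc.
--     """
--     heading_segments = []
--     detail_segments = []
--
--     # Common heading loop IDs and segment IDs
--     heading_loops = {'1000A', '1000B', '1000C'}  # Submitter, Receiver, etc.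
--     heading_segment_ids = {'ST', 'BHT', 'BGN', 'BPR', 'TRN', 'CUR', 'REF', 'DTM', 'BGN'}
--
--     # Segments that typically start the detail section
--     detail_start_segments = {'CLP', 'CLM', 'INS', 'HL', 'LX'}
--
--     in_detail = False
--
--     for segment in segments:
--         seg_id = segment.get('segment_id')
--         loop_id = segment.get('loop_id', '')
--
--         # Check if we've entered the detail section
--         if seg_id in detail_start_segments:
--             in_detail = True
--
--         # Classify segment
--         if not in_detail:
--             # Check if it's a heading segment
--             if seg_id in heading_segment_ids or loop_id in heading_loops:
--                 heading_segments.append(segment)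
--             elif seg_id == 'N1':
--                 # N1 segments in the beginning are usually heading
--                 heading_segments.append(segment)
--             else:
--                 detail_segments.append(segment)
--         else:
--             detail_segments.append(segment)
--
--     return heading_segments, detail_segments
-- ===== SOURCE B (Python) =====
-- from typing import Dict, Any, List, Optional, Union
--
-- def _partition_segments(segments: List[Dict[str, Any]]) -> tuple:
--     """Boundary-based partition: find the first detail-start segment, classify
--     only the prefix before it, then append the whole suffix to detail."""
--     detail_start_segments = {'CLP', 'CLM', 'INS', 'HL', 'LX'}
--     heading_loops = {'1000A', '1000B', '1000C'}
--     heading_segment_ids = {'ST', 'BHT', 'BGN', 'BPR', 'TRN', 'CUR', 'REF', 'DTM'}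
--
--     split = len(segments)
--     for i, segment in enumerate(segments):
--         if segment.get('segment_id') in detail_start_segments:
--             split = i
--             break
--
--     heading_segments = []
--     detail_segments = []
--     for segment in segments[:split]:
--         if (segment.get('segment_id') in heading_segment_ids
--                 or segment.get('loop_id', '') in heading_loops
--                 or segment.get('segment_id') == 'N1'):
--             heading_segments.append(segment)
--         else:
--             detail_segments.append(segment)
--
--     detail_segments.extend(segments[split:])
--     return heading_segments, detail_segments
-- ===== Notes on version B (the rewrite author's own statement) =====
-- stated objective: simpler
-- what changed: Replaces A's stateful in_detail flag threaded through one loop with a precomputed boundary (index of the first detail-start segment), a single-condition classification of the prefix, and a wholesale extend of the suffix into detail.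
import Mathlib
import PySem

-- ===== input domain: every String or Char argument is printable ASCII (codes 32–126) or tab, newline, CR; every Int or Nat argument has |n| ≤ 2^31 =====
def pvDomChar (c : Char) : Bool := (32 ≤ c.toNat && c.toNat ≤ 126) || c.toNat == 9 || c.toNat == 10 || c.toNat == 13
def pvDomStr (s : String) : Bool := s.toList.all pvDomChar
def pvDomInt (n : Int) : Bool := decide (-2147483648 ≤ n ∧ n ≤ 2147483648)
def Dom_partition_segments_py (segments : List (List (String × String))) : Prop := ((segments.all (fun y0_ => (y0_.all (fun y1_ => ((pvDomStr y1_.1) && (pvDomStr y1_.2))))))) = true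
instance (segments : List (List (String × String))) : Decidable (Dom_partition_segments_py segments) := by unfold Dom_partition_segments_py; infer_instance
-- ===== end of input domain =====

-- B replaces A's stateful in_detail flag by first computing the detail boundary, then
-- classifying only the prefix and appending the suffix wholesale (objective: simpler).

-- segment.get(k) — first-match association-list lookup (exact: Python dict keys are unique)
def pvGetOpt (seg : List (String × String)) (k : String) : Option String :=
  (seg.find? (fun p => p.1 == k)).map (·.2)

-- segment.get('loop_id', '')
def pvGetLoop (seg : List (String × String)) : String :=
  (pvGetOpt seg "loop_id").getD ""

-- seg_id in detail_start_segments  (None is never in the set)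
def pvIsDetailStart (seg : List (String × String)) : Bool :=
  match pvGetOpt seg "segment_id" with
  | some x => ["CLP", "CLM", "INS", "HL", "LX"].contains x
  | none => false

-- seg_id in heading_segment_ids / loop_id in heading_loops
def pvHeadId (o : Option String) : Bool :=
  match o with
  | some x => ["ST", "BHT", "BGN", "BPR", "TRN", "CUR", "REF", "DTM"].contains x
  | none => false

def pvHeadLoop (s : String) : Bool := ["1000A", "1000B", "1000C"].contains s

-- ===== PORT A =====
-- the for-loop of A: accumulators heading/detail, the in_detail flag
def pvLoopA (segs : List (List (String × String)))
    (heading detail : List (List (String × String))) (inDetail : Bool) :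
    (List (List (String × String))) × (List (List (String × String))) :=
  match segs with
  | [] => (heading, detail)
  | seg :: rest =>
    let segId := pvGetOpt seg "segment_id"
    let loopId := pvGetLoop seg
    let inDetail' := if pvIsDetailStart seg then true else inDetail
    if !inDetail' then
      if pvHeadId segId || pvHeadLoop loopId then
        pvLoopA rest (heading ++ [seg]) detail inDetail'
      else if segId == some "N1" then
        pvLoopA rest (heading ++ [seg]) detail inDetail'
      else
        pvLoopA rest heading (detail ++ [seg]) inDetail'
    else
      pvLoopA rest heading (detail ++ [seg]) inDetail'

def partition_segments_py (segments : List (List (String × String))) :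
    (List (List (String × String))) × (List (List (String × String))) :=
  pvLoopA segments [] [] false

-- ===== PORT B =====
-- the heading test of Source B's single classification branch
def pvIsHeading (seg : List (String × String)) : Bool :=
  pvHeadId (pvGetOpt seg "segment_id") || pvHeadLoop (pvGetLoop seg)
    || (pvGetOpt seg "segment_id" == some "N1")

def partition_segments_py_alt (segments : List (List (String × String))) :
    (List (List (String × String))) × (List (List (String × String))) :=
  let pre := segments.takeWhile (fun s => !(pvIsDetailStart s))
  let suf := segments.dropWhile (fun s => !(pvIsDetailStart s))
  let p := pre.partition pvIsHeading
  (p.1, p.2 ++ suf)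

-- ===== PRECONDITION & SPEC =====
def Spec_partition_segments_py (segments : List (List (String × String))) (out : (List (List (String × String))) × (List (List (String × String)))) : Prop := out = partition_segments_py_alt segments
instance (segments : List (List (String × String))) (out : (List (List (String × String))) × (List (List (String × String)))) : Decidable (Spec_partition_segments_py segments out) := by unfold Spec_partition_segments_py; infer_instance

-- ===== CLAIM (what is proved, stated in full; the proofs are below) =====
def Claim_equal_partition_segments_py : Prop := ∀ (segments : List (List (String × String))), Dom_partition_segments_py segments → Spec_partition_segments_py segments (partition_segments_py segments)

-- ===== LEMMAS AND PROOFS =====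

-- once in_detail, everything goes to detail
theorem pvLoopA_true (segs : List (List (String × String)))
    (h d : List (List (String × String))) :
    pvLoopA segs h d true = (h, d ++ segs) := by
  induction segs generalizing d with
  | nil => simp [pvLoopA]
  | cons s rest ih => simp [pvLoopA, ih]

-- before the boundary, A's loop computes B's boundary-based partition
theorem pvLoopA_false (segs : List (List (String × String)))
    (h d : List (List (String × String))) :
    pvLoopA segs h d false =
      (h ++ (partition_segments_py_alt segs).1, d ++ (partition_segments_py_alt segs).2) := by
  induction segs generalizing h d with
  | nil => simp [pvLoopA, partition_segments_py_alt]
  | cons s rest ih =>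
    by_cases hds : pvIsDetailStart s = true
    · simp [pvLoopA, hds, pvLoopA_true, partition_segments_py_alt]
    · simp only [Bool.not_eq_true] at hds
      by_cases hc : (pvHeadId (pvGetOpt s "segment_id") || pvHeadLoop (pvGetLoop s)) = true
      · have hh : pvIsHeading s = true := by simp [pvIsHeading, hc]
        simp [pvLoopA, hds, hc, ih, partition_segments_py_alt,
          List.partition_eq_filter_filter, hh]
      · have hc' : (pvHeadId (pvGetOpt s "segment_id") || pvHeadLoop (pvGetLoop s)) = false :=
          Bool.eq_false_iff.mpr hc
        by_cases hn : (pvGetOpt s "segment_id" == some "N1") = true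
        · have hh : pvIsHeading s = true := by simp [pvIsHeading, hn]
          simp [pvLoopA, hds, hc', hn, ih, partition_segments_py_alt,
            List.partition_eq_filter_filter, hh]
        · have hn' : (pvGetOpt s "segment_id" == some "N1") = false := Bool.eq_false_iff.mpr hn
          have hh : pvIsHeading s = false := by simp [pvIsHeading, hc', hn']
          simp [pvLoopA, hds, hc', hn', ih, partition_segments_py_alt,
            List.partition_eq_filter_filter, hh]

-- ===== VERDICT (by name: the statement is the Claim_ definition above) =====
theorem partition_segments_py_spec : Claim_equal_partition_segments_py := by
  intro segments _
  unfold Spec_partition_segments_py partition_segments_py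
  rw [pvLoopA_false]
  simp
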